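-- pv_equiv track=rewrite | github.com/jaydeelew/leet_python311 | 0_FirstNonAdjacent.py | firstNonAdjacent
-- ===== SOURCE A (Python) =====
-- def firstNonAdjacent(s):
--     n = len(s)
--
--     if n == 0:
--         return None
--
--     # Check the first character if it is not the same as the second one
--     if n > 1 and s[0] != s[1]:
--         return s[0]
--     elif n == 1:
--         return s[0]
--
--     # Traverse the string and check adjacent characters
--     for i in range(1, n - 1):
--         if s[i] != s[i - 1] and s[i] != s[i + 1]:
--             return s[i]
--
--     # Check the last character if it is not the same as the second to last one
--     if s[-1] != s[-2]:
--         return s[-1]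
--
--     return None
-- ===== SOURCE B (Python) =====
-- def firstNonAdjacent(s):
--     # Scan maximal runs of equal characters; the first singleton run's
--     # character is the first char differing from both neighbors.
--     i, n = 0, len(s)
--     while i < n:
--         j = i
--         while j < n and s[j] == s[i]:
--             j += 1
--         if j - i == 1:
--             return s[i]
--         i = j
--     return None
-- ===== Notes on version B (the rewrite author's own statement) =====
-- stated objective: idiomatic
-- what changed: B iterates over maximal runs of equal characters and returns the first singleton run's character, replacing A's indexed neighbor comparisons with three special-cased branches for the first/only/last character.
import Mathlib
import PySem

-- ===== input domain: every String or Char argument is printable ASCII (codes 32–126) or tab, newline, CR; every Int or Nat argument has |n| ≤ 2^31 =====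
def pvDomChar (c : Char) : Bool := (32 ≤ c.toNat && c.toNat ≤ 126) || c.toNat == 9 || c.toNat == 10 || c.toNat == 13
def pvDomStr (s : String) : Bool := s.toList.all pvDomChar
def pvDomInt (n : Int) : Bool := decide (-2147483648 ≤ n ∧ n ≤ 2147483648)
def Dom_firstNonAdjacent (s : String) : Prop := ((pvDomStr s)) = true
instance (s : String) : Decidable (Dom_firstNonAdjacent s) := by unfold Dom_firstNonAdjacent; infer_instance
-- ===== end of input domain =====

-- B replaces A's indexed neighbor comparisons (with separate first/only/last-char branches)
-- by a single scan over maximal runs of equal characters, returning the first singleton run.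

-- ===== PORT A =====
-- the for-loop over range(1, n-1); all pyGetD indices are in range wherever the loop runs
def pvAloop (cs : List Char) (i : Nat) : Option Char :=
  if i + 1 < cs.length then
    if PySem.List.pyGetD cs (i : Int) ' ' ≠ PySem.List.pyGetD cs ((i : Int) - 1) ' ' ∧
       PySem.List.pyGetD cs (i : Int) ' ' ≠ PySem.List.pyGetD cs ((i : Int) + 1) ' ' then
      some (PySem.List.pyGetD cs (i : Int) ' ')
    else pvAloop cs (i + 1)
  else none
termination_by cs.length - i

def firstNonAdjacent (s : String) : Option String :=
  let cs := s.toList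
  let n := cs.length
  if n = 0 then none
  else if 1 < n ∧ PySem.List.pyGetD cs 0 ' ' ≠ PySem.List.pyGetD cs 1 ' ' then
    some (String.mk [PySem.List.pyGetD cs 0 ' '])
  else if n = 1 then some (String.mk [PySem.List.pyGetD cs 0 ' '])
  else
    match pvAloop cs 1 with
    | some c => some (String.mk [c])
    | none =>
      if PySem.List.pyGetD cs (-1) ' ' ≠ PySem.List.pyGetD cs (-2) ' ' then
        some (String.mk [PySem.List.pyGetD cs (-1) ' '])
      else none

-- ===== PORT B =====
-- the outer while-loop of Source B; the inner while (advance j past the run) is dropWhile,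
-- and `j - i == 1` is `rest'.length = rest.length` (nothing was dropped)
def pvBgo (cs : List Char) : Option Char :=
  match cs with
  | [] => none
  | c :: rest =>
    let rest' := List.dropWhile (· == c) rest
    if rest'.length = rest.length then some c
    else pvBgo rest'
termination_by cs.length
decreasing_by
  simp only [List.length_cons]
  exact Nat.lt_succ_of_le (List.length_dropWhile_le _ _)

def firstNonAdjacent_alt (s : String) : Option String :=
  (pvBgo s.toList).map (fun c => String.mk [c])

-- ===== PRECONDITION & SPEC =====
def Spec_firstNonAdjacent (s : String) (out : Option String) : Prop := out = firstNonAdjacent_alt s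
instance (s : String) (out : Option String) : Decidable (Spec_firstNonAdjacent s out) := by unfold Spec_firstNonAdjacent; infer_instance

-- ===== CLAIM (what is proved, stated in full; the proofs are below) =====
def Claim_equal_firstNonAdjacent : Prop := ∀ (s : String), Dom_firstNonAdjacent s → Spec_firstNonAdjacent s (firstNonAdjacent s)

-- ===== LEMMAS AND PROOFS =====

-- A's loop + trailing last-character check, as a structural scan carrying the previous char
def pvScan : Char → List Char → Option Char
  | _, [] => none
  | p, [b] => if b ≠ p then some b else none
  | p, b :: c :: t => if b ≠ p ∧ b ≠ c then some b else pvScan b (c :: t)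

-- A's combined result at the char level
def pvAcore (cs : List Char) : Option Char :=
  if cs.length = 0 then none
  else if 1 < cs.length ∧ PySem.List.pyGetD cs 0 ' ' ≠ PySem.List.pyGetD cs 1 ' ' then
    some (PySem.List.pyGetD cs 0 ' ')
  else if cs.length = 1 then some (PySem.List.pyGetD cs 0 ' ')
  else
    match pvAloop cs 1 with
    | some c => some c
    | none =>
      if PySem.List.pyGetD cs (-1) ' ' ≠ PySem.List.pyGetD cs (-2) ' ' then
        some (PySem.List.pyGetD cs (-1) ' ')
      else none

lemma firstNonAdjacent_eq_core (s : String) :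
    firstNonAdjacent s = (pvAcore s.toList).map (fun c => String.mk [c]) := by
  unfold firstNonAdjacent pvAcore
  generalize s.toList = cs
  cases h : pvAloop cs 1 <;> simp only [h] <;> split_ifs <;> rfl

lemma pvAloop_last_eq_scan : ∀ (t : List Char) (b p : Char) (cs : List Char) (i : Nat),
    1 ≤ i → cs.drop (i - 1) = p :: b :: t →
    (match pvAloop cs i with
     | some c => some c
     | none =>
       if PySem.List.pyGetD cs (-1) ' ' ≠ PySem.List.pyGetD cs (-2) ' ' then
         some (PySem.List.pyGetD cs (-1) ' ')
       else none) = pvScan p (b :: t) := by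
  intro t
  induction t with
  | nil =>
    intro b p cs i hi hdrop
    have hlen : cs.length = i + 1 := by
      have := congrArg List.length hdrop
      simp [List.length_drop] at this
      omega
    have h0 : cs[i - 1]? = some p := by
      have h : (cs.drop (i - 1))[0]? = cs[i - 1 + 0]? := List.getElem?_drop
      rw [hdrop] at h
      simpa using h.symm
    have h1 : cs[i]? = some b := by
      have h : (cs.drop (i - 1))[1]? = cs[i - 1 + 1]? := List.getElem?_drop
      rw [hdrop] at h
      have e : i - 1 + 1 = i := by omega
      rw [e] at h
      simpa using h.symm
    obtain ⟨hlt1, hb⟩ := List.getElem?_eq_some_iff.mp h1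
    obtain ⟨hlt0, hp⟩ := List.getElem?_eq_some_iff.mp h0
    rw [pvAloop]
    rw [if_neg (by omega)]
    have e1 : PySem.List.pyGetD cs (-1) ' ' = b := by
      rw [PySem.List.pyGetD_neg_ofNat cs 1 ' ' (by omega) (by omega)]
      have e : cs.length - 1 = i := by omega
      simp only [e]
      exact hb
    have e2 : PySem.List.pyGetD cs (-2) ' ' = p := by
      rw [PySem.List.pyGetD_neg_ofNat cs 2 ' ' (by omega) (by omega)]
      have e : cs.length - 2 = i - 1 := by omega
      simp only [e]
      exact hp
    simp only [e1, e2, pvScan]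
  | cons c t2 ih =>
    intro b p cs i hi hdrop
    have hlen : cs.length = i + 2 + t2.length := by
      have := congrArg List.length hdrop
      simp [List.length_drop] at this
      omega
    have hdrop' : cs.drop i = b :: c :: t2 := by
      have := congrArg (List.drop 1) hdrop
      rw [List.drop_drop] at this
      have e : i - 1 + 1 = i := by omega
      simp only [e] at this
      simpa using this
    have h0 : cs[i - 1]? = some p := by
      have h : (cs.drop (i - 1))[0]? = cs[i - 1 + 0]? := List.getElem?_drop
      rw [hdrop] at h
      simpa using h.symm
    have h1 : cs[i]? = some b := by
      have h : (cs.drop i)[0]? = cs[i + 0]? := List.getElem?_drop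
      rw [hdrop'] at h
      simpa using h.symm
    have h2 : cs[i + 1]? = some c := by
      have h : (cs.drop i)[1]? = cs[i + 1]? := List.getElem?_drop
      rw [hdrop'] at h
      simpa using h.symm
    have g1 : PySem.List.pyGetD cs (i : Int) ' ' = b := by
      rw [PySem.List.pyGetD_natCast]
      simp [List.getD_eq_getElem?_getD, h1]
    have g0 : PySem.List.pyGetD cs ((i : Int) - 1) ' ' = p := by
      have e : (i : Int) - 1 = ((i - 1 : Nat) : Int) := by omega
      rw [e, PySem.List.pyGetD_natCast]
      simp [List.getD_eq_getElem?_getD, h0]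
    have g2 : PySem.List.pyGetD cs ((i : Int) + 1) ' ' = c := by
      have e : (i : Int) + 1 = ((i + 1 : Nat) : Int) := by push_cast; ring
      rw [e, PySem.List.pyGetD_natCast]
      simp [List.getD_eq_getElem?_getD, h2]
    rw [pvAloop, if_pos (by omega)]
    simp only [g0, g1, g2]
    by_cases hcond : b ≠ p ∧ b ≠ c
    · rw [if_pos hcond]
      simp [pvScan, hcond.1, hcond.2]
    · rw [if_neg hcond]
      have := ih c b cs (i + 1) (by omega) (by simpa using hdrop')
      rw [this]
      have : ¬(b ≠ p ∧ b ≠ c) := hcond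
      simp only [pvScan]
      rw [if_neg hcond]

lemma pvScan_eq_pvBgo : ∀ (n : Nat) (t : List Char) (p : Char), t.length ≤ n →
    pvScan p t = pvBgo (List.dropWhile (· == p) t) := by
  intro n
  induction n with
  | zero =>
    intro t p h
    have : t = [] := by
      cases t with
      | nil => rfl
      | cons x xs => simp at h
    subst this
    simp [pvScan, pvBgo]
  | succ n ih =>
    intro t p h
    match t with
    | [] => simp [pvScan, pvBgo]
    | [b] =>
      by_cases hbp : b = p
      · subst hbp
        simp [pvScan, pvBgo]
      · rw [pvScan]
        have hdw : List.dropWhile (· == p) [b] = [b] := by simp [hbp]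
        rw [hdw, pvBgo]
        simp [hbp]
    | b :: c :: t2 =>
      by_cases hbp : b = p
      · subst hbp
        have hdw : List.dropWhile (· == b) (b :: c :: t2) = List.dropWhile (· == b) (c :: t2) := by
          simp
        rw [hdw, ← ih (c :: t2) b (by simp at h ⊢; omega)]
        simp [pvScan]
      · have hdw : List.dropWhile (· == p) (b :: c :: t2) = b :: c :: t2 := by
          simp [hbp]
        rw [hdw]
        by_cases hbc : b = c
        · subst hbc
          have h1 : pvScan p (b :: b :: t2) = pvScan b (b :: t2) := by
            simp [pvScan]
          rw [h1, ih (b :: t2) b (by simp at h ⊢; omega)]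
          rw [pvBgo]
          have hdw2 : List.dropWhile (· == b) (b :: t2) = List.dropWhile (· == b) t2 := by
            simp
          have hne : (List.dropWhile (· == b) (b :: t2)).length ≠ (b :: t2).length := by
            rw [hdw2]
            have := List.length_dropWhile_le (· == b) t2
            simp
            omega
          rw [if_neg hne]
        · have h1 : pvScan p (b :: c :: t2) = some b := by
            simp [pvScan, hbp, hbc]
          rw [h1, pvBgo]
          have hdw2 : List.dropWhile (· == b) (c :: t2) = c :: t2 := by
            simp [Ne.symm hbc]
          rw [if_pos (by rw [hdw2])]

lemma core_eq_bgo (cs : List Char) : pvAcore cs = pvBgo cs := by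
  match cs with
  | [] => simp [pvAcore, pvBgo]
  | [a] =>
    rw [pvAcore, pvBgo]
    simp [PySem.List.pyGetD_zero_cons]
  | a :: b :: t =>
    have g0 : PySem.List.pyGetD (a :: b :: t) 0 ' ' = a := PySem.List.pyGetD_zero_cons a (b :: t) ' '
    have g1 : PySem.List.pyGetD (a :: b :: t) 1 ' ' = b := by
      simp [PySem.List.pyGetD, PySem.List.pyGet?, PySem.List.pyIdx?]
    rw [pvAcore]
    simp only [g0, g1, List.length_cons]
    by_cases hab : a = b
    · rw [if_neg (by omega), if_neg (by simp [hab]), if_neg (by omega)]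
      have hmain := pvAloop_last_eq_scan t b a (a :: b :: t) 1 (by omega) (by simp)
      rw [hmain, pvScan_eq_pvBgo (b :: t).length (b :: t) a (le_refl _)]
      rw [pvBgo]
      have hdw : List.dropWhile (· == a) (b :: t) = List.dropWhile (· == a) t := by
        simp [hab.symm]
      have hne : (List.dropWhile (· == a) (b :: t)).length ≠ (b :: t).length := by
        rw [hdw]
        have := List.length_dropWhile_le (· == a) t
        simp
        omega
      rw [if_neg hne, hdw]
    · rw [if_neg (by omega), if_pos (by refine ⟨by omega, hab⟩)]
      rw [pvBgo]
      have hdw : List.dropWhile (· == a) (b :: t) = b :: t := by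
        simp [Ne.symm hab]
      rw [if_pos (by rw [hdw])]

-- ===== VERDICT (by name: the statement is the Claim_ definition above) =====
theorem firstNonAdjacent_spec : Claim_equal_firstNonAdjacent := by
  intro s _
  unfold Spec_firstNonAdjacent firstNonAdjacent_alt
  rw [firstNonAdjacent_eq_core, core_eq_bgo]
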